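-- pv_equiv track=rewrite | github.com/Arsen1302/Code-copy-detector | TestData/solutions/problem_1637_4.py | solution_1637_4
-- ===== SOURCE A (Python) =====
-- from typing import List
--
-- def solution_1637_4(nums: List[int]) -> bool:
--
--   grid = [0] * (len(nums) + 1)
--   grid[0] = 1
--
--   if nums[0] == nums[1]:
--     grid[2] = 1
--
--   for t in range(3, len(nums)+1):
--     if nums[t-1] == nums[t-2]:
--       grid[t] = (grid[t-2] or grid[t])
--     if nums[t-1] == nums[t-2] == nums[t-3] or \
--        nums[t-1] == nums[t-2] + 1 == nums[t-3] + 2: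
--       grid[t] = (grid[t-3] or grid[t])
--
--   return grid[-1]
-- ===== SOURCE B (Python) =====
-- from typing import List
--
-- def solution_1637_4(nums: List[int]) -> bool:
--   # Run-length encode, then a two-state scan over runs: a valid split uses
--   # pairs/triples of equal values inside a run (a block of e equal leftovers is
--   # coverable iff e != 1) and consecutive triples v,v+1,v+2, which can only sit
--   # at a run boundary of shape (last of run k, whole length-1 run k+1, first of
--   # run k+2).  f0[k] / f1[k] say whether the suffix of runs from k is coverable
--   # with the first element of run k free / already consumed.
--   runs = []
--   for x in nums:
--     if runs and runs[-1][0] == x: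
--       runs[-1] = (x, runs[-1][1] + 1)
--     else:
--       runs.append((x, 1))
--   m = len(runs)
--   f0_next, f1_next, f1_next2 = True, False, False  # f0[k+1], f1[k+1], f1[k+2]
--   for k in range(m - 1, -1, -1):
--     v, L = runs[k]
--     tri = k + 2 < m and runs[k + 1] == (v + 1, 1) and runs[k + 2][0] == v + 2
--     f0_k = (L != 1 and f0_next) or (L != 2 and tri and f1_next2)
--     f1_k = (L != 2 and f0_next) or (L >= 2 and L != 3 and tri and f1_next2)
--     f0_next, f1_next, f1_next2 = f0_k, f1_k, f1_next
--   return int(f0_next)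
-- ===== Notes on version B (the rewrite author's own statement) =====
-- stated objective: alternative
-- what changed: Replaces A's prefix DP over element indices by run-length encoding plus a backward two-state scan over runs: a block of e equal leftovers is coverable iff e != 1, and a consecutive triple can only sit at a boundary (last of run k, a whole length-1 run k+1, first of run k+2), so three carried booleans over the run list decide the answer.
-- outside the precondition, e.g. on solution_1637_4([]): A raises IndexError, B returns 1; on solution_1637_4([1]): A raises IndexError, B returns 0; on solution_1637_4([0]): A raises IndexError, B returns 0
import Mathlib
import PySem

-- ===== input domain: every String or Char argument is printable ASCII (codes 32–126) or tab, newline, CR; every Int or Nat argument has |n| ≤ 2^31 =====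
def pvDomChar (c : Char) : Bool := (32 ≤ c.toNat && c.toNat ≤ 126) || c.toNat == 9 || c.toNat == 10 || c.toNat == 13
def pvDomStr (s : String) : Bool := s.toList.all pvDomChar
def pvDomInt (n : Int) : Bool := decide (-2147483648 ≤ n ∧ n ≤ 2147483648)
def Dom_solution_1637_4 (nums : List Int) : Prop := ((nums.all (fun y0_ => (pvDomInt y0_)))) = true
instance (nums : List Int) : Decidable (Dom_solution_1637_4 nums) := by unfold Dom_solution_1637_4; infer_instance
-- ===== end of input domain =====

-- B replaces A's prefix DP over element indices by run-length encoding plus a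
-- backward two-state scan over the run list; same O(n) cost, different algorithm.


-- ===== PORT A =====
-- xs[i] read through PySem; within Pre_ every access A makes is in range,
-- so the default 0 is never used
def pvAt (xs : List Int) (i : Int) : Int := PySem.List.pyGetD xs i 0

-- one iteration of A's `for t in range(3, len(nums)+1)` loop
def pvStepA (nums : List Int) (grid : List Int) (t : Int) : List Int :=
  let grid :=
    if pvAt nums (t-1) == pvAt nums (t-2) then
      grid.set t.toNat (if pvAt grid (t-2) ≠ 0 then pvAt grid (t-2) else pvAt grid t)
    else grid
  if (pvAt nums (t-1) == pvAt nums (t-2) && pvAt nums (t-2) == pvAt nums (t-3)) ||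
     (pvAt nums (t-1) == pvAt nums (t-2) + 1 && pvAt nums (t-2) + 1 == pvAt nums (t-3) + 2) then
    grid.set t.toNat (if pvAt grid (t-3) ≠ 0 then pvAt grid (t-3) else pvAt grid t)
  else grid

def solution_1637_4 (nums : List Int) : Int :=
  let n := nums.length
  let grid := List.replicate (n+1) (0:Int)
  let grid := grid.set 0 1
  let grid := if pvAt nums 0 == pvAt nums 1 then grid.set 2 1 else grid
  let grid := (PySem.List.pyRange 3 ((n:Int)+1) 1).foldl (pvStepA nums) grid
  pvAt grid (-1)

-- ===== PORT B =====
-- B's run-length-encoding loop body: `if runs and runs[-1][0] == x: …`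
def pvRunStep (runs : List (Int × Int)) (x : Int) : List (Int × Int) :=
  match runs.getLast? with
  | some (v, c) => if v == x then runs.dropLast ++ [(x, c + 1)] else runs ++ [(x, 1)]
  | none => runs ++ [(x, 1)]

-- B's backward loop body over run indices k = m-1 … 0; state = (f0[k+1], f1[k+1], f1[k+2])
def pvStepB (runs : List (Int × Int)) (st : Bool × Bool × Bool) (k : Int) : Bool × Bool × Bool :=
  let m : Int := runs.length
  let v := (PySem.List.pyGetD runs k (0, 0)).1
  let L := (PySem.List.pyGetD runs k (0, 0)).2
  let tri := decide (k + 2 < m) && (PySem.List.pyGetD runs (k+1) (0, 0) == (v + 1, 1)) &&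
             ((PySem.List.pyGetD runs (k+2) (0, 0)).1 == v + 2)
  let f0k := (!(L == 1) && st.1) || (!(L == 2) && tri && st.2.2)
  let f1k := (!(L == 2) && st.1) || (decide (2 ≤ L) && !(L == 3) && tri && st.2.2)
  (f0k, f1k, st.2.1)

def solution_1637_4_alt (nums : List Int) : Int :=
  let runs := nums.foldl pvRunStep []
  let m : Int := runs.length
  let st := (PySem.List.pyRange (m - 1) (-1) (-1)).foldl (pvStepB runs) (true, false, false)
  if st.1 then 1 else 0

-- ===== PRECONDITION & SPEC =====
-- A unconditionally reads nums[0] and nums[1], raising IndexError on lists of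
-- length < 2; exactly those inputs are excluded.
def Pre_solution_1637_4 (nums : List Int) : Prop := 2 ≤ nums.length
instance (nums : List Int) : Decidable (Pre_solution_1637_4 nums) := by unfold Pre_solution_1637_4; infer_instance
def pvWitness_solution_1637_4 : List Int := [1, 1, 2, 3, 4]

def Spec_solution_1637_4 (nums : List Int) (out : Int) : Prop := out = solution_1637_4_alt nums
instance (nums : List Int) (out : Int) : Decidable (Spec_solution_1637_4 nums out) := by unfold Spec_solution_1637_4; infer_instance

-- ===== CLAIM (what is proved, stated in full; the proofs are below) =====
def Claim_equal_solution_1637_4 : Prop := ∀ (nums : List Int), Dom_solution_1637_4 nums → Pre_solution_1637_4 nums → Spec_solution_1637_4 nums (solution_1637_4 nums)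

-- ===== LEMMAS AND PROOFS =====

-- the common specification: pvP nums t decides whether the prefix nums[:t] splits
-- into valid groups (pairs of equal values, triples of equal or consecutive values)
def pvPair (nums : List Int) (i : Nat) : Bool :=
  decide (nums.getD i 0 = nums.getD (i+1) 0)

def pvTriple (nums : List Int) (i : Nat) : Bool :=
  decide ((nums.getD i 0 = nums.getD (i+1) 0 ∧ nums.getD (i+1) 0 = nums.getD (i+2) 0) ∨
          (nums.getD i 0 + 2 = nums.getD (i+1) 0 + 1 ∧ nums.getD (i+1) 0 + 1 = nums.getD (i+2) 0))

def pvP (nums : List Int) : Nat → Bool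
  | 0 => true
  | 1 => false
  | 2 => pvPair nums 0
  | (t+3) => (pvPair nums (t+1) && pvP nums (t+1)) || (pvTriple nums t && pvP nums t)

-- ---------- A side: the grid holds pvP on every processed prefix ----------

lemma getD_set (g : List Int) (T : Nat) (hT : T < g.length) (j : Nat) (v : Int) :
    (g.set T v).getD j 0 = if j = T then v else g.getD j 0 := by
  unfold List.getD
  rw [List.getElem?_set]
  by_cases h : T = j
  · subst h; simp [hT]
  · simp [h, Ne.symm h]

lemma stepA_spec (nums g : List Int) (T : Nat) (h3 : 3 ≤ T) (hTn : T ≤ nums.length)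
    (hlen : g.length = nums.length + 1)
    (hg2 : g.getD (T-2) 0 = if pvP nums (T-2) = true then 1 else 0)
    (hg3 : g.getD (T-3) 0 = if pvP nums (T-3) = true then 1 else 0)
    (hgT : g.getD T 0 = 0) :
    (pvStepA nums g (T:Int)).length = nums.length + 1 ∧
    ∀ j : Nat, (pvStepA nums g (T:Int)).getD j 0 =
      if j = T then (if pvP nums T = true then 1 else 0) else g.getD j 0 := by
  have hTlen : T < g.length := by omega
  have s1 : ((T:Int)-1) = ((T-1:Nat):Int) := by omega
  have s2 : ((T:Int)-2) = ((T-2:Nat):Int) := by omega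
  have s3 : ((T:Int)-3) = ((T-3:Nat):Int) := by omega
  have hPT : pvP nums T = (pvPair nums (T-2) && pvP nums (T-2) || pvTriple nums (T-3) && pvP nums (T-3)) := by
    conv_lhs => rw [show T = (T-3)+3 by omega]
    rw [show pvP nums ((T-3)+3) = (pvPair nums ((T-3)+1) && pvP nums ((T-3)+1) || pvTriple nums (T-3) && pvP nums (T-3)) from rfl]
    rw [show T-3+1 = T-2 by omega]
  have hb1 : (nums.getD (T-1) 0 == nums.getD (T-2) 0) = pvPair nums (T-2) := by
    rw [Bool.eq_iff_iff]
    simp only [beq_iff_eq, pvPair, decide_eq_true_eq]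
    rw [show T-2+1 = T-1 by omega]
    omega
  have hb2 : ((nums.getD (T-1) 0 == nums.getD (T-2) 0 && nums.getD (T-2) 0 == nums.getD (T-3) 0) ||
      (nums.getD (T-1) 0 == nums.getD (T-2) 0 + 1 && nums.getD (T-2) 0 + 1 == nums.getD (T-3) 0 + 2))
      = pvTriple nums (T-3) := by
    rw [Bool.eq_iff_iff]
    simp only [beq_iff_eq, Bool.and_eq_true, Bool.or_eq_true, pvTriple, decide_eq_true_eq]
    rw [show T-3+1 = T-2 by omega, show T-3+2 = T-1 by omega]
    omega
  unfold pvStepA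
  simp only [pvAt, s1, s2, s3, PySem.List.pyGetD_natCast, Int.toNat_natCast]
  rw [hb2, hb1, hg2, hgT]
  have hv2 : (if (if pvP nums (T-2) = true then (1:Int) else 0) ≠ 0 then (if pvP nums (T-2) = true then (1:Int) else 0) else 0) = (if pvP nums (T-2) = true then (1:Int) else 0) := by
    by_cases q : pvP nums (T-2) = true <;> simp [q]
  rw [hv2]
  have hne3 : T - 3 ≠ T := by omega
  by_cases p1 : pvPair nums (T-2) = true <;> by_cases p2 : pvTriple nums (T-3) = true
  · rw [if_pos p2, if_pos p1, List.set_set, getD_set g T hTlen (T-3), if_neg hne3, hg3,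
        getD_set g T hTlen T, if_pos rfl]
    refine ⟨by simp [hlen], fun j => ?_⟩
    rw [getD_set g T hTlen j]
    by_cases hj : j = T
    · rw [if_pos hj, if_pos hj, hPT, p1, p2]
      by_cases q3 : pvP nums (T-3) = true <;> by_cases q2 : pvP nums (T-2) = true <;>
        simp [q2, q3]
    · rw [if_neg hj, if_neg hj]
  · rw [Bool.not_eq_true] at p2
    rw [if_neg (show ¬(pvTriple nums (T-3) = true) by simp [p2]), if_pos p1]
    refine ⟨by simp [hlen], fun j => ?_⟩
    rw [getD_set g T hTlen j]
    by_cases hj : j = T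
    · rw [if_pos hj, if_pos hj, hPT, p1, p2]
      simp
    · rw [if_neg hj, if_neg hj]
  · rw [Bool.not_eq_true] at p1
    rw [if_pos p2, if_neg (show ¬(pvPair nums (T-2) = true) by simp [p1]), hg3, hgT]
    have hv3 : (if (if pvP nums (T-3) = true then (1:Int) else 0) ≠ 0 then (if pvP nums (T-3) = true then (1:Int) else 0) else (0:Int)) = (if pvP nums (T-3) = true then (1:Int) else 0) := by
      by_cases q : pvP nums (T-3) = true <;> simp [q]
    rw [hv3]
    refine ⟨by simp [hlen], fun j => ?_⟩
    rw [getD_set g T hTlen j]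
    by_cases hj : j = T
    · rw [if_pos hj, if_pos hj, hPT, p1, p2]
      simp
    · rw [if_neg hj, if_neg hj]
  · rw [Bool.not_eq_true] at p1 p2
    rw [if_neg (show ¬(pvTriple nums (T-3) = true) by simp [p2]),
        if_neg (show ¬(pvPair nums (T-2) = true) by simp [p1])]
    refine ⟨hlen, fun j => ?_⟩
    by_cases hj : j = T
    · rw [if_pos hj, hPT, p1, p2, hj, hgT]
      simp
    · rw [if_neg hj]

def pvGrid0 (nums : List Int) : List Int :=
  let g := (List.replicate (nums.length+1) (0:Int)).set 0 1
  if pvAt nums 0 == pvAt nums 1 then g.set 2 1 else g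

lemma grid0_length (nums : List Int) : (pvGrid0 nums).length = nums.length + 1 := by
  unfold pvGrid0
  split_ifs <;> simp

lemma grid0_getD (nums : List Int) (h : 2 ≤ nums.length) (j : Nat) :
    (pvGrid0 nums).getD j 0 = if j < 3 ∧ pvP nums j = true then 1 else 0 := by
  have e0 : pvAt nums 0 = nums.getD 0 0 := by
    rw [pvAt, show (0:Int) = ((0:Nat):Int) by norm_num, PySem.List.pyGetD_natCast]
  have e1 : pvAt nums 1 = nums.getD 1 0 := by
    rw [pvAt, show (1:Int) = ((1:Nat):Int) by norm_num, PySem.List.pyGetD_natCast]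
  have hrep : ∀ k : Nat, (List.replicate (nums.length+1) (0:Int)).getD k 0 = 0 := by
    intro k
    unfold List.getD
    rw [List.getElem?_replicate]
    split_ifs <;> rfl
  unfold pvGrid0
  rw [e0, e1]
  by_cases hp : nums.getD 0 0 = nums.getD 1 0
  · rw [if_pos (show (nums.getD 0 0 == nums.getD 1 0) = true by simp only [beq_iff_eq]; exact hp)]
    rw [getD_set _ 2 (by simp only [List.length_set, List.length_replicate]; omega) j,
        getD_set _ 0 (by simp only [List.length_replicate]; omega) j]
    rcases j with _ | _ | _ | j
    · simp [pvP]
    · simp [pvP]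
    · simp [pvP, pvPair]
      exact hp
    · simp
  · rw [if_neg (show ¬ (nums.getD 0 0 == nums.getD 1 0) = true by simp only [beq_iff_eq]; exact hp)]
    rw [getD_set _ 0 (by simp only [List.length_replicate]; omega) j]
    rcases j with _ | _ | _ | j
    · simp [pvP]
    · simp [pvP]
    · simp [pvP, pvPair]
      exact hp
    · simp

lemma gridInvA (nums : List Int) (h : 2 ≤ nums.length) :
    ∀ T : Nat, 3 ≤ T → T ≤ nums.length + 1 →
      (((PySem.List.pyRange 3 ((T:Nat):Int) 1).foldl (pvStepA nums) (pvGrid0 nums)).length = nums.length + 1 ∧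
       (∀ j : Nat, j < T →
          ((PySem.List.pyRange 3 ((T:Nat):Int) 1).foldl (pvStepA nums) (pvGrid0 nums)).getD j 0 =
            if pvP nums j = true then 1 else 0) ∧
       (∀ j : Nat, T ≤ j →
          ((PySem.List.pyRange 3 ((T:Nat):Int) 1).foldl (pvStepA nums) (pvGrid0 nums)).getD j 0 = 0)) := by
  intro T hT3
  induction T, hT3 using Nat.le_induction with
  | base =>
    intro _
    rw [show (((3:Nat)):Int) = (3:Int) by norm_num,
        show PySem.List.pyRange 3 3 1 = [] from rfl, List.foldl_nil]
    refine ⟨grid0_length nums, fun j hj => ?_, fun j hj => ?_⟩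
    · rw [grid0_getD nums h j]
      by_cases q : pvP nums j = true
      · rw [if_pos ⟨hj, q⟩, if_pos q]
      · rw [if_neg (fun hc => q hc.2), if_neg q]
    · rw [grid0_getD nums h j, if_neg (fun hc => by omega)]
  | succ T hT3 ih =>
    intro hT1
    have hTn : T ≤ nums.length := by omega
    obtain ⟨hlen, hlt, hge⟩ := ih (by omega)
    have hrange : PySem.List.pyRange 3 (((T+1:Nat)):Int) 1 =
        PySem.List.pyRange 3 ((T:Nat):Int) 1 ++ [((T:Nat):Int)] := by
      rw [show (((T+1:Nat)):Int) = ((T:Nat):Int) + 1 by push_cast; ring]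
      exact PySem.List.pyRange_one_succ_right (by exact_mod_cast hT3)
    rw [hrange, List.foldl_append, List.foldl_cons, List.foldl_nil]
    obtain ⟨hlen', hpt⟩ := stepA_spec nums _ T hT3 hTn hlen
      (hlt _ (by omega)) (hlt _ (by omega)) (hge _ le_rfl)
    refine ⟨hlen', fun j hj => ?_, fun j hj => ?_⟩
    · rw [hpt j]
      by_cases hjT : j = T
      · rw [if_pos hjT, hjT]
      · rw [if_neg hjT]
        exact hlt j (by omega)
    · rw [hpt j, if_neg (by omega), hge j (by omega)]

lemma lemA (nums : List Int) (h : 2 ≤ nums.length) :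
    solution_1637_4 nums = if pvP nums nums.length = true then 1 else 0 := by
  show pvAt ((PySem.List.pyRange 3 ((nums.length:Int)+1) 1).foldl (pvStepA nums) (pvGrid0 nums)) (-1)
      = if pvP nums nums.length = true then 1 else 0
  rw [show ((nums.length:Int)+1) = (((nums.length+1:Nat)):Int) by push_cast; ring]
  obtain ⟨hlen, hlt, hge⟩ := gridInvA nums h (nums.length+1) (by omega) le_rfl
  set g := (PySem.List.pyRange 3 (((nums.length+1:Nat)):Int) 1).foldl (pvStepA nums) (pvGrid0 nums) with hg
  rw [pvAt, PySem.List.pyGetD_neg_ofNat g 1 0 (by omega) (by omega)]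
  have hval : g[g.length - 1]'(by omega) = g.getD (g.length - 1) 0 :=
    (List.getD_eq_getElem g 0 (by omega)).symm
  rw [hval, show g.length - 1 = nums.length by omega]
  exact hlt nums.length (by omega)

-- ---------- bridge: prefix DP pvP equals suffix DP pvQ at full length ----------

-- pvQ nums i : the suffix nums[i:] splits into valid groups
def pvQ (nums : List Int) (i : Nat) : Bool :=
  if h : nums.length ≤ i then i == nums.length
  else (pvPair nums i && pvQ nums (i+2)) || (pvTriple nums i && pvQ nums (i+3))
termination_by nums.length - i
decreasing_by all_goals omega

-- pvGood nums i j : the segment nums[i:j] splits into valid groups (front-first)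
inductive pvGood (nums : List Int) : Nat → Nat → Prop
  | refl (i : Nat) : pvGood nums i i
  | pair (i j : Nat) : i + 2 ≤ j → pvPair nums i = true → pvGood nums (i+2) j → pvGood nums i j
  | triple (i j : Nat) : i + 3 ≤ j → pvTriple nums i = true → pvGood nums (i+3) j → pvGood nums i j

lemma good_le {nums : List Int} {i j : Nat} (h : pvGood nums i j) : i ≤ j := by
  induction h with
  | refl => omega
  | pair _ _ h _ _ _ => omega
  | triple _ _ h _ _ _ => omega

lemma good_trans {nums : List Int} {a b c : Nat}
    (h1 : pvGood nums a b) (h2 : pvGood nums b c) : pvGood nums a c := by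
  induction h1 with
  | refl => exact h2
  | pair i j hle hp _ ih => exact pvGood.pair i c (by have := good_le (ih h2); omega) hp (ih h2)
  | triple i j hle ht _ ih => exact pvGood.triple i c (by have := good_le (ih h2); omega) ht (ih h2)

lemma good_last {nums : List Int} {i j : Nat} (h : pvGood nums i j) :
    i = j ∨ ∃ c, pvGood nums i c ∧
      ((c + 2 = j ∧ pvPair nums c = true) ∨ (c + 3 = j ∧ pvTriple nums c = true)) := by
  induction h with
  | refl i => exact Or.inl rfl
  | pair i j hle hp hg ih =>
    refine Or.inr ?_
    rcases ih with he | ⟨c, gc, w⟩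
    · exact ⟨i, pvGood.refl i, Or.inl ⟨by omega, hp⟩⟩
    · exact ⟨c, pvGood.pair i c (good_le gc) hp gc, w⟩
  | triple i j hle ht hg ih =>
    refine Or.inr ?_
    rcases ih with he | ⟨c, gc, w⟩
    · exact ⟨i, pvGood.refl i, Or.inr ⟨by omega, ht⟩⟩
    · exact ⟨c, pvGood.triple i c (good_le gc) ht gc, w⟩

lemma Q_out (nums : List Int) (j : Nat) (hj : nums.length < j) : pvQ nums j = false := by
  rw [pvQ]
  rw [dif_pos (by omega)]
  simp
  omega

lemma Q_iff_aux (nums : List Int) :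
    ∀ F i, i ≤ nums.length → nums.length - i ≤ F →
      (pvQ nums i = true ↔ pvGood nums i nums.length) := by
  intro F
  induction F with
  | zero =>
    intro i h1 h2
    have : i = nums.length := by omega
    subst this
    rw [pvQ, dif_pos le_rfl]
    simp only [beq_self_eq_true, true_iff]
    exact pvGood.refl _
  | succ F ih =>
    intro i h1 h2
    by_cases he : i = nums.length
    · subst he
      rw [pvQ, dif_pos le_rfl]
      simp only [beq_self_eq_true, true_iff]
      exact pvGood.refl _
    · have hlt : i < nums.length := by omega
      rw [pvQ, dif_neg (by omega)]
      constructor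
      · intro hor
        rcases Bool.or_eq_true_iff.mp hor with hb | hb
        · obtain ⟨hp, hq⟩ := Bool.and_eq_true_iff.mp hb
          by_cases h2le : i + 2 ≤ nums.length
          · exact pvGood.pair i _ h2le hp ((ih (i+2) h2le (by omega)).mp hq)
          · rw [Q_out nums (i+2) (by omega)] at hq; exact absurd hq (by simp)
        · obtain ⟨ht, hq⟩ := Bool.and_eq_true_iff.mp hb
          by_cases h3le : i + 3 ≤ nums.length
          · exact pvGood.triple i _ h3le ht ((ih (i+3) h3le (by omega)).mp hq)
          · rw [Q_out nums (i+3) (by omega)] at hq; exact absurd hq (by simp)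
      · intro hg
        cases hg with
        | refl => omega
        | pair _ _ hle hp hg' =>
          exact Bool.or_eq_true_iff.mpr (Or.inl (Bool.and_eq_true_iff.mpr
            ⟨hp, (ih _ hle (by omega)).mpr hg'⟩))
        | triple _ _ hle ht hg' =>
          exact Bool.or_eq_true_iff.mpr (Or.inr (Bool.and_eq_true_iff.mpr
            ⟨ht, (ih _ hle (by omega)).mpr hg'⟩))

lemma Q_iff (nums : List Int) (i : Nat) (h : i ≤ nums.length) :
    pvQ nums i = true ↔ pvGood nums i nums.length :=
  Q_iff_aux nums (nums.length - i) i h le_rfl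

lemma P_iff (nums : List Int) : ∀ t : Nat, (pvP nums t = true ↔ pvGood nums 0 t) := by
  intro t
  induction t using Nat.strong_induction_on with
  | _ t ih =>
    match t with
    | 0 =>
      simp only [pvP, true_iff]
      exact pvGood.refl 0
    | 1 =>
      simp only [pvP]
      constructor
      · intro h; exact absurd h (by simp)
      · intro hg
        exfalso
        rcases good_last hg with he | ⟨c, _, (⟨hc, _⟩ | ⟨hc, _⟩)⟩ <;> omega
    | 2 =>
      show pvPair nums 0 = true ↔ _
      constructor
      · intro hp
        exact pvGood.pair 0 2 (by omega) hp (pvGood.refl 2)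
      · intro hg
        rcases good_last hg with he | ⟨c, gc, (⟨hc, hp⟩ | ⟨hc, _⟩)⟩
        · omega
        · have : c = 0 := by omega
          subst this; exact hp
        · omega
    | (u+3) =>
      show ((pvPair nums (u+1) && pvP nums (u+1)) || (pvTriple nums u && pvP nums u)) = true ↔ _
      constructor
      · intro hor
        rcases Bool.or_eq_true_iff.mp hor with hb | hb
        · obtain ⟨hp, hP⟩ := Bool.and_eq_true_iff.mp hb
          exact good_trans ((ih (u+1) (by omega)).mp hP)
            (pvGood.pair (u+1) (u+3) (by omega) hp (pvGood.refl (u+3)))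
        · obtain ⟨ht, hP⟩ := Bool.and_eq_true_iff.mp hb
          exact good_trans ((ih u (by omega)).mp hP)
            (pvGood.triple u (u+3) (by omega) ht (pvGood.refl (u+3)))
      · intro hg
        rcases good_last hg with he | ⟨c, gc, (⟨hc, hp⟩ | ⟨hc, ht⟩)⟩
        · omega
        · have : c = u+1 := by omega
          subst this
          exact Bool.or_eq_true_iff.mpr (Or.inl (Bool.and_eq_true_iff.mpr
            ⟨hp, (ih (u+1) (by omega)).mpr gc⟩))
        · have hcu : c = u := by omega
          rw [hcu] at gc ht
          exact Bool.or_eq_true_iff.mpr (Or.inr (Bool.and_eq_true_iff.mpr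
            ⟨ht, (ih u (by omega)).mpr gc⟩))

lemma P_eq_Q (nums : List Int) : pvP nums nums.length = pvQ nums 0 := by
  rw [Bool.eq_iff_iff, P_iff nums nums.length, Q_iff nums 0 (by omega)]

-- ---------- B side: runs machinery ----------

def pvFlat (runs : List (Int × Int)) : List Int :=
  (runs.map (fun p => List.replicate p.2.toNat p.1)).flatten

def pvWF (runs : List (Int × Int)) : Prop :=
  (∀ p ∈ runs, 1 ≤ p.2) ∧ runs.IsChain (fun p q => p.1 ≠ q.1)

lemma flat_append (a b : List (Int × Int)) : pvFlat (a ++ b) = pvFlat a ++ pvFlat b := by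
  simp [pvFlat]

lemma runStep_spec (runs : List (Int × Int)) (x : Int) (h : pvWF runs) :
    pvWF (pvRunStep runs x) ∧ pvFlat (pvRunStep runs x) = pvFlat runs ++ [x] := by
  obtain ⟨hlen, hch⟩ := h
  match hlast : runs.getLast? with
  | none =>
    have hnil : runs = [] := List.getLast?_eq_none_iff.mp hlast
    have hstep : pvRunStep runs x = runs ++ [(x, 1)] := by
      unfold pvRunStep; rw [hlast]
    rw [hstep]
    subst hnil
    refine ⟨⟨?_, ?_⟩, ?_⟩
    · intro p hp; simp at hp; subst hp; norm_num
    · simp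
    · simp [pvFlat]
  | some (v, c) =>
    have hdecomp : runs.dropLast ++ [(v, c)] = runs := List.dropLast_append_getLast? _ hlast
    have hmem : (v, c) ∈ runs := by rw [← hdecomp]; simp
    have hc1 : 1 ≤ c := hlen _ hmem
    have hstep : pvRunStep runs x =
        (if v == x then runs.dropLast ++ [(x, c + 1)] else runs ++ [(x, 1)]) := by
      unfold pvRunStep; rw [hlast]
    rw [hstep]
    have hchd : (runs.dropLast).IsChain (fun p q => p.1 ≠ q.1) := by
      rw [← hdecomp] at hch; exact hch.left_of_append
    have hrel : ∀ a ∈ runs.dropLast.getLast?, ∀ b ∈ ([((v:Int), (c:Int))]).head?, a.1 ≠ b.1 := by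
      rw [← hdecomp] at hch
      exact (List.isChain_append.mp hch).2.2
    by_cases hvx : v = x
    · rw [if_pos (by simpa using hvx)]
      subst hvx
      refine ⟨⟨?_, ?_⟩, ?_⟩
      · intro p hp
        rcases List.mem_append.mp hp with hp | hp
        · exact hlen _ (List.mem_of_mem_dropLast hp)
        · simp at hp; subst hp; omega
      · refine List.IsChain.append hchd (by simp) ?_
        intro a ha b hb
        simp at hb; subst hb
        exact hrel a ha (v, c) (by simp)
      · rw [flat_append, ← hdecomp, flat_append]
        have htn : (c + 1).toNat = c.toNat + 1 := by omega
        simp only [pvFlat, List.map_cons, List.map_nil, List.flatten_cons, List.flatten_nil,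
          List.append_nil, htn, List.replicate_succ']
        rw [List.append_assoc, List.dropLast_concat]
    · rw [if_neg (by simpa using hvx)]
      refine ⟨⟨?_, ?_⟩, ?_⟩
      · intro p hp
        rcases List.mem_append.mp hp with hp | hp
        · exact hlen _ hp
        · simp at hp; subst hp; norm_num
      · refine List.IsChain.append hch (by simp) ?_
        intro a ha b hb
        simp at hb; subst hb
        rw [hlast] at ha; simp at ha; subst ha
        simpa using hvx
      · simp [pvFlat]

lemma runs_build_aux (xs : List Int) : ∀ runs, pvWF runs →
    pvWF (xs.foldl pvRunStep runs) ∧ pvFlat (xs.foldl pvRunStep runs) = pvFlat runs ++ xs := by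
  induction xs with
  | nil => intro runs h; exact ⟨h, by simp⟩
  | cons x xs ih =>
    intro runs h
    obtain ⟨hw, hf⟩ := runStep_spec runs x h
    obtain ⟨hw', hf'⟩ := ih _ hw
    refine ⟨hw', ?_⟩
    rw [List.foldl_cons, hf', hf, List.append_assoc]
    rfl

lemma runs_build (nums : List Int) :
    pvWF (nums.foldl pvRunStep []) ∧ pvFlat (nums.foldl pvRunStep []) = nums := by
  obtain ⟨hw, hf⟩ := runs_build_aux nums [] ⟨by simp, by simp⟩
  exact ⟨hw, by simpa [pvFlat] using hf⟩

-- prefix sums of run lengths: the start position of run k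
def pvS (runs : List (Int × Int)) (k : Nat) : Nat :=
  ((runs.take k).map (fun p => p.2.toNat)).sum

-- abbreviations used throughout the B-side proofs
def pvV (runs : List (Int × Int)) (k : Nat) : Int := (runs.getD k (0,0)).1
def pvL (runs : List (Int × Int)) (k : Nat) : Nat := (runs.getD k (0,0)).2.toNat

-- the Bool the port's `tri` computes, at a Nat index
def pvTriB (runs : List (Int × Int)) (k : Nat) : Bool :=
  decide (k + 2 < runs.length) && (runs.getD (k+1) (0,0) == (pvV runs k + 1, 1)) &&
    ((runs.getD (k+2) (0,0)).1 == pvV runs k + 2)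

lemma s_succ (runs : List (Int × Int)) (k : Nat) (hk : k < runs.length) :
    pvS runs (k+1) = pvS runs k + pvL runs k := by
  unfold pvS pvL
  rw [show runs.take (k+1) = runs.take k ++ [runs[k]] from by
    rw [List.take_add_one, List.getElem?_eq_getElem hk]; rfl]
  rw [List.map_append, List.sum_append]
  simp [List.getD, List.getElem?_eq_getElem hk]

lemma s_top (runs : List (Int × Int)) (k : Nat) (hk : runs.length ≤ k) :
    pvS runs k = pvS runs runs.length := by
  unfold pvS
  rw [List.take_of_length_le hk, List.take_of_length_le le_rfl]

lemma s_mono (runs : List (Int × Int)) (k1 k2 : Nat) (h : k1 ≤ k2) :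
    pvS runs k1 ≤ pvS runs k2 := by
  unfold pvS
  conv_rhs => rw [← List.take_append_drop k1 (runs.take k2)]
  rw [List.take_take, min_eq_left h, List.map_append, List.sum_append]
  omega

lemma flat_take_len (runs : List (Int × Int)) (k : Nat) :
    (pvFlat (runs.take k)).length = pvS runs k := by
  simp [pvFlat, pvS, List.map_map, Function.comp_def]

lemma flat_len (runs : List (Int × Int)) : (pvFlat runs).length = pvS runs runs.length := by
  have := flat_take_len runs runs.length
  rwa [List.take_of_length_le le_rfl] at this

lemma elem_at (runs : List (Int × Int)) (nums : List Int) (hf : pvFlat runs = nums)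
    (k o : Nat) (hk : k < runs.length) (ho : o < pvL runs k) :
    nums.getD (pvS runs k + o) 0 = pvV runs k := by
  have hdecomp : runs = runs.take k ++ runs[k] :: runs.drop (k+1) := by
    conv_lhs => rw [← List.take_append_drop k runs]
    rw [List.drop_eq_getElem_cons hk]
  have hflat : nums = pvFlat (runs.take k) ++
      (List.replicate runs[k].2.toNat runs[k].1 ++ pvFlat (runs.drop (k+1))) := by
    rw [← hf]
    conv_lhs => rw [hdecomp]
    rw [flat_append]
    congr 1
  have hlenA : (pvFlat (runs.take k)).length = pvS runs k := flat_take_len runs k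
  have hoL : o < runs[k].2.toNat := by
    unfold pvL at ho
    rwa [List.getD_eq_getElem _ _ hk] at ho
  rw [hflat]
  unfold List.getD
  rw [List.getElem?_append_right (by omega), show pvS runs k + o - (pvFlat (runs.take k)).length = o by omega,
      List.getElem?_append_left (by simpa using hoL), List.getElem?_replicate, if_pos hoL]
  unfold pvV
  rw [List.getD_eq_getElem _ _ hk]
  rfl

lemma adj_ne (runs : List (Int × Int)) (h : pvWF runs) (k : Nat) (hk : k + 1 < runs.length) :
    pvV runs k ≠ pvV runs (k+1) := by
  have := List.isChain_iff_getElem.mp h.2 k hk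
  unfold pvV
  rw [List.getD_eq_getElem _ _ (by omega), List.getD_eq_getElem _ _ hk]
  exact this


lemma L_pos (runs : List (Int × Int)) (h : pvWF runs) (k : Nat) (hk : k < runs.length) :
    1 ≤ pvL runs k := by
  have hmem : runs.getD k (0,0) ∈ runs := by
    rw [List.getD_eq_getElem _ _ hk]; exact List.getElem_mem hk
  have := h.1 _ hmem
  unfold pvL
  omega

lemma Q_top (nums : List Int) : pvQ nums nums.length = true := by
  rw [pvQ, dif_pos le_rfl]
  simp

lemma Qchar (runs : List (Int × Int)) (nums : List Int) (hwf : pvWF runs)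
    (hf : pvFlat runs = nums) :
    ∀ rem k, k < runs.length → 1 ≤ rem → rem ≤ pvL runs k →
      pvQ nums (pvS runs (k+1) - rem) =
        (((!decide (rem = 1)) && pvQ nums (pvS runs (k+1))) ||
         ((!decide (rem = 2)) && pvTriB runs k && pvQ nums (pvS runs (k+2) + 1))) := by
  have hn : pvS runs runs.length = nums.length := by rw [← hf, flat_len]
  intro rem
  induction rem using Nat.strong_induction_on with
  | _ rem ih =>
    intro k hk h1 h2
    have hLk := L_pos runs hwf k hk
    have hsk : pvS runs (k+1) = pvS runs k + pvL runs k := s_succ runs k hk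
    have hk1n : pvS runs (k+1) ≤ nums.length := by
      rw [← hn]; exact s_mono runs (k+1) runs.length hk
    have hin : pvS runs (k+1) - rem < nums.length := by omega
    have hgi : nums.getD (pvS runs (k+1) - rem) 0 = pvV runs k := by
      rw [show pvS runs (k+1) - rem = pvS runs k + (pvL runs k - rem) from by omega]
      exact elem_at runs nums hf k _ hk (by omega)
    have hgin : ∀ o : Nat, o < pvL runs k →
        nums.getD (pvS runs k + o) 0 = pvV runs k := fun o ho => elem_at runs nums hf k o hk ho
    rw [pvQ, dif_neg (by omega)]
    rcases Nat.lt_or_ge rem 3 with hr3 | hr3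
    · rcases (show rem = 1 ∨ rem = 2 by omega) with hr | hr
      · -- rem = 1 : last element of run k
        subst hr
        have hi1 : pvS runs (k+1) - 1 + 1 = pvS runs (k+1) := by omega
        by_cases hk1 : k + 1 < runs.length
        · have hLk1 := L_pos runs hwf (k+1) hk1
          have hsk1 : pvS runs (k+2) = pvS runs (k+1) + pvL runs (k+1) := s_succ runs (k+1) hk1
          have hg1 : nums.getD (pvS runs (k+1) - 1 + 1) 0 = pvV runs (k+1) := by
            rw [hi1, show pvS runs (k+1) = pvS runs (k+1) + 0 from by omega]
            exact elem_at runs nums hf (k+1) 0 hk1 (by omega)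
          have hvne := adj_ne runs hwf k hk1
          have hpair : pvPair nums (pvS runs (k+1) - 1) = false := by
            unfold pvPair
            rw [hgi, hg1]
            simp [hvne]
          rw [hpair]
          by_cases hL1 : pvL runs (k+1) = 1
          · -- middle run has length 1
            have hi2 : pvS runs (k+1) - 1 + 2 = pvS runs (k+2) := by omega
            by_cases hk2 : k + 2 < runs.length
            · have hg2 : nums.getD (pvS runs (k+1) - 1 + 2) 0 = pvV runs (k+2) := by
                rw [hi2, show pvS runs (k+2) = pvS runs (k+2) + 0 from by omega]
                exact elem_at runs nums hf (k+2) 0 hk2 (L_pos runs hwf (k+2) hk2)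
              have hsnd : (runs.getD (k+1) (0,0)).2 = 1 := by
                have hmem : runs.getD (k+1) (0,0) ∈ runs := by
                  rw [List.getD_eq_getElem _ _ hk1]; exact List.getElem_mem hk1
                have := hwf.1 _ hmem
                unfold pvL at hL1
                omega
              have htri : pvTriple nums (pvS runs (k+1) - 1) = pvTriB runs k := by
                unfold pvV at hvne
                unfold pvTriple pvTriB
                rw [hgi, hg1, hg2]
                unfold pvV
                rw [Bool.eq_iff_iff]
                simp only [Bool.and_eq_true, decide_eq_true_eq, beq_iff_eq, Prod.ext_iff]
                constructor
                · rintro (⟨he, _⟩ | ⟨ha, hb⟩)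
                  · exact absurd he hvne
                  · exact ⟨⟨hk2, by omega, hsnd⟩, by omega⟩
                · rintro ⟨⟨_, ⟨hv1, _⟩⟩, hv2⟩
                  exact Or.inr ⟨by omega, by omega⟩
              have hi3 : pvS runs (k+1) - 1 + 3 = pvS runs (k+2) + 1 := by omega
              rw [htri, hi3]
              have e1 : (decide ((1:Nat) = 1)) = true := by simp
              have e2 : (decide ((1:Nat) = 2)) = false := by simp
              rw [e1, e2]
              simp
            · -- k+2 = m : the v+2 element would be past the end
              have hm : k + 2 = runs.length := by omega
              have hs2n : pvS runs (k+2) = nums.length := by rw [hm, hn]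
              have hq3 : pvQ nums (pvS runs (k+1) - 1 + 3) = false :=
                Q_out nums _ (by omega)
              have htb : pvTriB runs k = false := by
                unfold pvTriB
                simp [hk2]
              rw [hq3, htb]
              simp
          · -- middle run longer than 1 : no consecutive triple possible
            have hg2 : nums.getD (pvS runs (k+1) - 1 + 2) 0 = pvV runs (k+1) := by
              rw [show pvS runs (k+1) - 1 + 2 = pvS runs (k+1) + 1 from by omega]
              exact elem_at runs nums hf (k+1) 1 hk1 (by omega)
            have htri : pvTriple nums (pvS runs (k+1) - 1) = false := by
              unfold pvTriple
              rw [hgi, hg1, hg2]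
              simp only [decide_eq_false_iff_not]
              rintro (⟨he, _⟩ | ⟨ha, hb⟩)
              · exact hvne he
              · exact hvne (by omega)
            have htb : pvTriB runs k = false := by
              unfold pvTriB
              have hsnd : (runs.getD (k+1) (0,0)).2 ≠ 1 := by
                have hmem : runs.getD (k+1) (0,0) ∈ runs := by
                  rw [List.getD_eq_getElem _ _ hk1]; exact List.getElem_mem hk1
                have := hwf.1 _ hmem
                unfold pvL at hL1
                omega
              simp only [Bool.and_eq_false_iff]
              left; right
              simp only [beq_eq_false_iff_ne, ne_eq, Prod.ext_iff, not_and]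
              intro _
              exact hsnd
            rw [htri, htb]
            simp
        · -- k+1 = m : run k is the last run
          have hm : k + 1 = runs.length := by omega
          have hq2 : pvQ nums (pvS runs (k+1) - 1 + 2) = false := by
            apply Q_out
            rw [show pvS runs (k+1) - 1 + 2 = pvS runs (k+1) + 1 from by omega, hm, hn]
            omega
          have hq3 : pvQ nums (pvS runs (k+1) - 1 + 3) = false := by
            apply Q_out
            rw [show pvS runs (k+1) - 1 + 3 = pvS runs (k+1) + 2 from by omega, hm, hn]
            omega
          have htb : pvTriB runs k = false := by
            unfold pvTriB
            simp [show ¬ (k + 2 < runs.length) by omega]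
          rw [hq2, hq3, htb]
          simp
      · -- rem = 2 : two last elements of run k
        subst hr
        have hi2 : pvS runs (k+1) - 2 + 2 = pvS runs (k+1) := by omega
        have hg1 : nums.getD (pvS runs (k+1) - 2 + 1) 0 = pvV runs k := by
          rw [show pvS runs (k+1) - 2 + 1 = pvS runs k + (pvL runs k - 1) from by omega]
          exact hgin _ (by omega)
        have hpair : pvPair nums (pvS runs (k+1) - 2) = true := by
          unfold pvPair
          rw [hgi, hg1]
          simp
        have htrifalse : (pvTriple nums (pvS runs (k+1) - 2) &&
            pvQ nums (pvS runs (k+1) - 2 + 3)) = false := by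
          by_cases hk1 : k + 1 < runs.length
          · have hLk1 := L_pos runs hwf (k+1) hk1
            have hg2 : nums.getD (pvS runs (k+1) - 2 + 2) 0 = pvV runs (k+1) := by
              rw [hi2, show pvS runs (k+1) = pvS runs (k+1) + 0 from by omega]
              exact elem_at runs nums hf (k+1) 0 hk1 (by omega)
            have hvne := adj_ne runs hwf k hk1
            have : pvTriple nums (pvS runs (k+1) - 2) = false := by
              unfold pvTriple
              rw [hgi, hg1, hg2]
              simp only [decide_eq_false_iff_not]
              rintro (⟨_, he⟩ | ⟨ha, _⟩)
              · exact hvne he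
              · omega
            rw [this]; simp
          · have hq3 : pvQ nums (pvS runs (k+1) - 2 + 3) = false := by
              apply Q_out
              rw [show pvS runs (k+1) - 2 + 3 = pvS runs (k+1) + 1 from by omega,
                  show k + 1 = runs.length from by omega, hn]
              omega
            rw [hq3]; simp
        rw [hpair, htrifalse, hi2]
        have e1 : (decide ((2:Nat) = 1)) = false := by simp
        have e2 : (decide ((2:Nat) = 2)) = true := by simp
        rw [e1, e2]
        simp
    · -- rem ≥ 3 : the next two or three elements stay inside run k
      have hg1 : nums.getD (pvS runs (k+1) - rem + 1) 0 = pvV runs k := by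
        rw [show pvS runs (k+1) - rem + 1 = pvS runs k + (pvL runs k - rem + 1) from by omega]
        exact hgin _ (by omega)
      have hg2 : nums.getD (pvS runs (k+1) - rem + 2) 0 = pvV runs k := by
        rw [show pvS runs (k+1) - rem + 2 = pvS runs k + (pvL runs k - rem + 2) from by omega]
        exact hgin _ (by omega)
      have hpair : pvPair nums (pvS runs (k+1) - rem) = true := by
        unfold pvPair
        rw [hgi, hg1]
        simp
      have htri : pvTriple nums (pvS runs (k+1) - rem) = true := by
        unfold pvTriple
        rw [hgi, hg1, hg2]
        simp
      rw [hpair, htri, Bool.true_and, Bool.true_and]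
      have hq2 : pvQ nums (pvS runs (k+1) - rem + 2) =
          (((!decide (rem - 2 = 1)) && pvQ nums (pvS runs (k+1))) ||
           ((!decide (rem - 2 = 2)) && pvTriB runs k && pvQ nums (pvS runs (k+2) + 1))) := by
        rw [show pvS runs (k+1) - rem + 2 = pvS runs (k+1) - (rem - 2) from by omega]
        exact ih (rem - 2) (by omega) k hk (by omega) (by omega)
      have hq3 : pvQ nums (pvS runs (k+1) - rem + 3) =
          (if rem = 3 then pvQ nums (pvS runs (k+1)) else
           (((!decide (rem - 3 = 1)) && pvQ nums (pvS runs (k+1))) ||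
            ((!decide (rem - 3 = 2)) && pvTriB runs k && pvQ nums (pvS runs (k+2) + 1)))) := by
        by_cases h3 : rem = 3
        · rw [if_pos h3, show pvS runs (k+1) - rem + 3 = pvS runs (k+1) from by omega]
        · rw [if_neg h3, show pvS runs (k+1) - rem + 3 = pvS runs (k+1) - (rem - 3) from by omega]
          exact ih (rem - 3) (by omega) k hk (by omega) (by omega)
      rw [hq2, hq3]
      have er1 : (decide (rem = 1)) = false := decide_eq_false (by omega)
      have er2 : (decide (rem = 2)) = false := decide_eq_false (by omega)
      rw [er1, er2]
      by_cases h3 : rem = 3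
      · subst h3
        rw [if_pos rfl]
        norm_num
        cases h1' : pvQ nums (pvS runs (k+1)) <;>
          cases h2' : (pvTriB runs k && pvQ nums (pvS runs (k+2) + 1)) <;> simp
      · rw [if_neg h3]
        by_cases h4 : rem = 4
        · subst h4
          norm_num
        · by_cases h5 : rem = 5
          · subst h5
            norm_num
            cases h1' : pvQ nums (pvS runs (k+1)) <;>
              cases h2' : (pvTriB runs k && pvQ nums (pvS runs (k+2) + 1)) <;> simp
          · have e31 : (decide (rem - 3 = 1)) = false := decide_eq_false (by omega)
            have e32 : (decide (rem - 3 = 2)) = false := decide_eq_false (by omega)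
            have e21 : (decide (rem - 2 = 1)) = false := decide_eq_false (by omega)
            have e22 : (decide (rem - 2 = 2)) = false := decide_eq_false (by omega)
            rw [e31, e32, e21, e22]
            cases h1' : pvQ nums (pvS runs (k+1)) <;>
              cases h2' : (pvTriB runs k && pvQ nums (pvS runs (k+2) + 1)) <;> simp


lemma pyRange_countdown_succ (a b : Int) (h : b ≤ a) :
    PySem.List.pyRange a (b-1) (-1) = PySem.List.pyRange a b (-1) ++ [b] := by
  rw [PySem.List.pyRange_neg_one, PySem.List.pyRange_neg_one]
  have h1 : (a-(b-1)).toNat = (a-b).toNat + 1 := by omega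
  rw [h1, List.range_succ, List.map_append]
  congr 1
  simp only [List.map_cons, List.map_nil]
  congr 1
  omega

lemma stepB_eval (runs : List (Int × Int)) (nums : List Int) (hwf : pvWF runs)
    (hf : pvFlat runs = nums) (k : Nat) (hk : k < runs.length) :
    pvStepB runs
      (pvQ nums (pvS runs (k+1)), pvQ nums (pvS runs (k+1) + 1), pvQ nums (pvS runs (k+2) + 1))
      ((k : Nat) : Int)
    = (pvQ nums (pvS runs k), pvQ nums (pvS runs k + 1), pvQ nums (pvS runs (k+1) + 1)) := by
  have hLpos := L_pos runs hwf k hk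
  have hsk : pvS runs (k+1) = pvS runs k + pvL runs k := s_succ runs k hk
  have hLint : 1 ≤ (runs.getD k (0,0)).2 := by
    have hmem : runs.getD k (0,0) ∈ runs := by
      rw [List.getD_eq_getElem _ _ hk]; exact List.getElem_mem hk
    exact hwf.1 _ hmem
  have hLnat : pvL runs k = (runs.getD k (0,0)).2.toNat := rfl
  unfold pvStepB
  have hcast1 : ((k:Nat):Int) + 1 = (((k+1:Nat)):Int) := by push_cast; ring
  have hcast2 : ((k:Nat):Int) + 2 = (((k+2:Nat)):Int) := by push_cast; ring
  simp only [hcast1, hcast2, PySem.List.pyGetD_natCast]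
  have htri : (decide (((k+2:Nat):Int) < (runs.length:Int)) &&
      (runs.getD (k+1) (0,0) == ((runs.getD k (0,0)).1 + 1, 1)) &&
      ((runs.getD (k+2) (0,0)).1 == (runs.getD k (0,0)).1 + 2)) = pvTriB runs k := by
    unfold pvTriB pvV
    have e : (decide ((((k+2:Nat)):Int) < (runs.length:Int))) = decide (k+2 < runs.length) := by
      rw [Bool.eq_iff_iff]; simp only [decide_eq_true_eq]; omega
    rw [e]
  rw [htri]
  have hb1 : ((runs.getD k (0,0)).2 == (1:Int)) = decide (pvL runs k = 1) := by
    rw [Bool.eq_iff_iff]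
    simp only [beq_iff_eq, decide_eq_true_eq, hLnat]
    omega
  have hb2 : ((runs.getD k (0,0)).2 == (2:Int)) = decide (pvL runs k = 2) := by
    rw [Bool.eq_iff_iff]
    simp only [beq_iff_eq, decide_eq_true_eq, hLnat]
    omega
  have hb3 : ((runs.getD k (0,0)).2 == (3:Int)) = decide (pvL runs k = 3) := by
    rw [Bool.eq_iff_iff]
    simp only [beq_iff_eq, decide_eq_true_eq, hLnat]
    omega
  have hb4 : (decide ((2:Int) ≤ (runs.getD k (0,0)).2)) = decide (2 ≤ pvL runs k) := by
    rw [Bool.eq_iff_iff]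
    simp only [decide_eq_true_eq, hLnat]
    omega
  rw [hb1, hb2, hb3, hb4]
  simp only [Prod.mk.injEq]
  refine ⟨?_, ?_, by trivial⟩
  · have h0 := Qchar runs nums hwf hf (pvL runs k) k hk hLpos le_rfl
    rw [show pvS runs (k+1) - pvL runs k = pvS runs k from by omega] at h0
    exact h0.symm
  · by_cases hL1 : pvL runs k = 1
    · have e1 : (decide (pvL runs k = 2)) = false := decide_eq_false (by omega)
      have e2 : (decide (2 ≤ pvL runs k)) = false := decide_eq_false (by omega)
      rw [e1, e2, show pvS runs k + 1 = pvS runs (k+1) from by omega]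
      simp
    · have h1 := Qchar runs nums hwf hf (pvL runs k - 1) k hk (by omega) (by omega)
      rw [show pvS runs (k+1) - (pvL runs k - 1) = pvS runs k + 1 from by omega] at h1
      rw [h1]
      have e1 : (decide (pvL runs k - 1 = 1)) = decide (pvL runs k = 2) := by
        rw [Bool.eq_iff_iff]; simp only [decide_eq_true_eq]; omega
      have e2 : (decide (pvL runs k - 1 = 2)) = decide (pvL runs k = 3) := by
        rw [Bool.eq_iff_iff]; simp only [decide_eq_true_eq]; omega
      have e3 : (decide (2 ≤ pvL runs k)) = true := decide_eq_true (by omega)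
      rw [e1, e2, e3]
      simp

lemma foldB (runs : List (Int × Int)) (nums : List Int) (hwf : pvWF runs)
    (hf : pvFlat runs = nums) :
    ∀ t, t ≤ runs.length →
      (PySem.List.pyRange ((runs.length:Int) - 1) ((runs.length:Int) - t - 1) (-1)).foldl
          (pvStepB runs) (true, false, false)
        = (pvQ nums (pvS runs (runs.length - t)),
           pvQ nums (pvS runs (runs.length - t) + 1),
           pvQ nums (pvS runs (runs.length - t + 1) + 1)) := by
  have hn : pvS runs runs.length = nums.length := by rw [← hf, flat_len]
  intro t
  induction t with
  | zero =>
    intro _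
    rw [show (runs.length:Int) - ((0:Nat):Int) - 1 = (runs.length:Int) - 1 from by push_cast; ring,
        PySem.List.pyRange_neg_one_eq_nil le_rfl, List.foldl_nil]
    have h1 : pvQ nums (pvS runs (runs.length - 0)) = true := by
      rw [Nat.sub_zero, hn]; exact Q_top nums
    have h2 : pvQ nums (pvS runs (runs.length - 0) + 1) = false := by
      rw [Nat.sub_zero, hn]; exact Q_out nums _ (by omega)
    have h3 : pvQ nums (pvS runs (runs.length - 0 + 1) + 1) = false := by
      rw [Nat.sub_zero, s_top runs (runs.length + 1) (by omega), hn]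
      exact Q_out nums _ (by omega)
    rw [h1, h2, h3]
  | succ t ih =>
    intro ht
    have hrange : PySem.List.pyRange ((runs.length:Int) - 1) ((runs.length:Int) - (((t+1:Nat)):Int) - 1) (-1)
        = PySem.List.pyRange ((runs.length:Int) - 1) ((runs.length:Int) - t - 1) (-1) ++
          [(runs.length:Int) - t - 1] := by
      rw [show (runs.length:Int) - (((t+1:Nat)):Int) - 1 = ((runs.length:Int) - (t:Int) - 1) - 1 from by push_cast [Nat.cast_add]; ring]
      exact pyRange_countdown_succ _ _ (by omega)
    rw [hrange, List.foldl_append, ih (by omega), List.foldl_cons, List.foldl_nil]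
    have hk : runs.length - t - 1 < runs.length := by omega
    have hcast : (runs.length:Int) - t - 1 = (((runs.length - t - 1 : Nat)):Int) := by omega
    have hk1 : runs.length - t - 1 + 1 = runs.length - t := by omega
    have hk2 : runs.length - t - 1 + 2 = runs.length - t + 1 := by omega
    have := stepB_eval runs nums hwf hf (runs.length - t - 1) hk
    rw [hk1, hk2] at this
    rw [hcast, this]
    rw [show runs.length - (t+1) = runs.length - t - 1 from by omega, hk1]

lemma lemB (nums : List Int) :
    solution_1637_4_alt nums = if pvQ nums 0 = true then 1 else 0 := by
  obtain ⟨hwf, hf⟩ := runs_build nums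
  show (if ((PySem.List.pyRange (((nums.foldl pvRunStep []).length:Int) - 1) (-1) (-1)).foldl
      (pvStepB (nums.foldl pvRunStep [])) (true, false, false)).1 then (1:Int) else 0) = _
  have h := foldB (nums.foldl pvRunStep []) nums hwf hf (nums.foldl pvRunStep []).length le_rfl
  rw [show ((((nums.foldl pvRunStep []).length):Int) - ((nums.foldl pvRunStep []).length:Nat) - 1)
      = (-1 : Int) from by omega] at h
  rw [h]
  rw [show (nums.foldl pvRunStep []).length - (nums.foldl pvRunStep []).length = 0 from by omega]
  rfl

-- ===== VERDICT (by name: the statement is the Claim_ definition above) =====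
theorem solution_1637_4_spec : Claim_equal_solution_1637_4 := by
  intro nums _ hpre
  unfold Spec_solution_1637_4
  rw [lemA nums hpre, P_eq_Q, lemB]
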